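-- pv_equiv track=rewrite | github.com/Minwook11/algorithm-study | programmers/Level 2/n_square_array.py | solution
-- ===== SOURCE A (Python) =====
-- def solution(n, left, right):
--     answer = []
--     for i in range(left,right + 1):
--         a, b = i//n, i%n
--         if a < b:
--             a,b = b,a
--         answer.append(a + 1)
--
--     return answer
-- ===== SOURCE B (Python) =====
-- def solution(n, left, right):
--     # Row-wise run-length construction: the flattened n x n table has row r equal to
--     # r copies of r+1 followed by r+1, r+2, ..., n.  For each row intersecting
--     # [left, right] emit the constant run and the increasing run directly, without
--     # computing i//n and i%n per element.
--     if right < left: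
--         return []
--     out = []
--     first_row, last_row = left // n, right // n
--     for r in range(first_row, last_row + 1):
--         lo = left - r * n if r == first_row else 0
--         hi = right - r * n + 1 if r == last_row else n
--         k = min(hi, r + 1)
--         if k > lo:
--             out.extend([r + 1] * (k - lo))
--         start = max(lo, r + 1)
--         if hi > start:
--             out.extend(range(start + 1, hi + 1))
--     return out
-- ===== Notes on version B (the rewrite author's own statement) =====
-- stated objective: alternative
-- what changed: B constructs the answer row-by-row using the table's run structure (row r = r copies of r+1 followed by r+1..n), emitting a constant run and an arithmetic range per intersecting row, instead of A's per-index i//n, i%n, max loop. Pre_ restricts to the problem's natural domain n >= 1 (plus the trivially empty right < left), excluding non-positive n where the n x n table does not exist.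
-- outside the precondition, e.g. on solution(-3, 2, 5): A returns [0, 1, -1, 0], B returns []; on solution(0, 0, 3): A raises ZeroDivisionError, B raises ZeroDivisionError
import Mathlib
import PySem

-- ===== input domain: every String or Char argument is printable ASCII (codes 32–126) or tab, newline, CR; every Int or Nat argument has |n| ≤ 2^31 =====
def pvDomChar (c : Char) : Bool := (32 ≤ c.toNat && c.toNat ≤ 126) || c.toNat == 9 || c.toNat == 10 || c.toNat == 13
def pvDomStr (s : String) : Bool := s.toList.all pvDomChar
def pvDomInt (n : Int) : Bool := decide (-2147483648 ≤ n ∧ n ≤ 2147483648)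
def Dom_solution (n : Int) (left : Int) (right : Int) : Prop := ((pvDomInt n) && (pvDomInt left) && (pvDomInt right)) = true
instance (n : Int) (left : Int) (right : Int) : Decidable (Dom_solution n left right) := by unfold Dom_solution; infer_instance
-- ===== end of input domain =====

-- B builds the slice row-by-row from the table's run structure (a constant run then an
-- arithmetic range per intersecting row) instead of A's per-index i//n, i%n, max loop; objective: alternative.

-- ===== PORT A =====
def solution (n : Int) (left : Int) (right : Int) : List Int :=
  (PySem.List.pyRange left (right + 1) 1).foldl
    (fun answer i =>
      let a := PySem.Int.floordiv i n
      let b := PySem.Int.mod i n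
      let (a, b) := if a < b then (b, a) else (a, b)
      answer ++ [a + 1]) []

-- ===== PORT B =====
def solution_alt (n : Int) (left : Int) (right : Int) : List Int :=
  if right < left then []
  else
    let firstRow := PySem.Int.floordiv left n
    let lastRow := PySem.Int.floordiv right n
    (PySem.List.pyRange firstRow (lastRow + 1) 1).foldl
      (fun out r =>
        let lo := if r == firstRow then left - r * n else 0
        let hi := if r == lastRow then right - r * n + 1 else n
        let k := min hi (r + 1)
        let out := if k > lo then out ++ List.replicate (k - lo).toNat (r + 1) else out
        let start := max lo (r + 1)
        if hi > start then out ++ PySem.List.pyRange (start + 1) (hi + 1) 1 else out) []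

-- ===== PRECONDITION & SPEC =====
-- Pre_ restricts to the problem's natural domain n ≥ 1 (the size of an n×n table), plus any
-- input with an empty index range (right < left), where both return []. It excludes n = 0
-- with a nonempty range (Python A raises ZeroDivisionError) and n ≤ -1 with a nonempty range,
-- which is outside the natural domain (A returns negative-floor-division values there; B returns []).
def Pre_solution (n : Int) (left : Int) (right : Int) : Prop := 1 ≤ n ∨ right < left
instance (n : Int) (left : Int) (right : Int) : Decidable (Pre_solution n left right) := by unfold Pre_solution; infer_instance
def pvWitness_solution : Int × Int × Int := (3, 2, 5)
def Spec_solution (n : Int) (left : Int) (right : Int) (out : List Int) : Prop := out = solution_alt n left right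
instance (n : Int) (left : Int) (right : Int) (out : List Int) : Decidable (Spec_solution n left right out) := by unfold Spec_solution; infer_instance

-- ===== CLAIM (what is proved, stated in full; the proofs are below) =====
def Claim_equal_solution : Prop := ∀ (n : Int) (left : Int) (right : Int), Dom_solution n left right → Pre_solution n left right → Spec_solution n left right (solution n left right)

-- ===== LEMMAS AND PROOFS =====

-- the per-index value A computes
def pvCell (n i : Int) : Int := max (PySem.Int.floordiv i n) (PySem.Int.mod i n) + 1

theorem solution_eq_map (n left right : Int) :
    solution n left right = (PySem.List.pyRange left (right + 1) 1).map (pvCell n) := by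
  unfold solution
  rw [PySem.List.foldl_append_singleton_eq_map]
  refine List.map_congr_left (fun i _ => ?_)
  by_cases h : PySem.Int.floordiv i n < PySem.Int.mod i n <;>
    simp [h, pvCell, max_def] <;> omega

def pvSeg (n left right r : Int) : List Int :=
  List.replicate ((min (min (right - r * n + 1) n) (r + 1) - max (left - r * n) 0).toNat) (r + 1) ++
    PySem.List.pyRange (max (max (left - r * n) 0) (r + 1) + 1) (min (right - r * n + 1) n + 1) 1

theorem pyRange_shift (a lo hi : Int) :
    PySem.List.pyRange (a + lo) (a + hi) 1 = (PySem.List.pyRange lo hi 1).map (a + ·) := by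
  rw [PySem.List.pyRange_one, PySem.List.pyRange_one, List.map_map]
  have h : a + hi - (a + lo) = hi - lo := by omega
  rw [h]
  exact List.map_congr_left (fun k _ => by simp [Function.comp]; omega)

theorem cell_eq (n r c : Int) (hn : 0 < n) (h0 : 0 ≤ c) (h1 : c < n) :
    pvCell n (r * n + c) = max r c + 1 := by
  unfold pvCell
  rw [PySem.Int.floordiv_eq_ediv_of_pos hn, PySem.Int.mod_eq_emod_of_pos hn]
  have hc : r * n + c = c + r * n := by ring
  rw [hc, Int.add_mul_ediv_right _ _ (by omega : n ≠ 0)]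
  rw [Int.add_mul_emod_self_right]
  rw [Int.ediv_eq_zero_of_lt h0 h1, Int.emod_eq_of_lt h0 h1]
  omega

theorem seg_shape (r : Int) : ∀ (k : Nat) (lo hi : Int), (hi - lo).toNat = k →
    List.replicate ((min hi (r + 1) - lo).toNat) (r + 1) ++
      PySem.List.pyRange (max lo (r + 1) + 1) (hi + 1) 1
    = (PySem.List.pyRange lo hi 1).map (fun c => max r c + 1) := by
  intro k
  induction k with
  | zero =>
    intro lo hi hk
    have h1 : hi ≤ lo := by omega
    rw [PySem.List.pyRange_one_eq_nil h1, PySem.List.pyRange_one_eq_nil (by omega : hi + 1 ≤ max lo (r + 1) + 1)]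
    have h2 : (min hi (r + 1) - lo).toNat = 0 := by omega
    simp [h2]
  | succ m ih =>
    intro lo hi hk
    have hlt : lo < hi := by omega
    rw [PySem.List.pyRange_one_cons hlt, List.map_cons]
    by_cases hc : lo ≤ r
    · have hmax : max r lo + 1 = r + 1 := by omega
      have hcount : (min hi (r + 1) - lo).toNat = (min hi (r + 1) - (lo + 1)).toNat + 1 := by omega
      rw [hcount, List.replicate_succ, hmax]
      have hmx : max lo (r + 1) = max (lo + 1) (r + 1) := by omega
      rw [hmx]
      simp only [List.cons_append]
      rw [ih (lo + 1) hi (by omega)]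
    · have hmax : max r lo + 1 = lo + 1 := by omega
      have hc0 : (min hi (r + 1) - lo).toNat = 0 := by omega
      have hc1 : (min hi (r + 1) - (lo + 1)).toNat = 0 := by omega
      rw [hmax, hc0]
      have hmx : max lo (r + 1) = lo := by omega
      rw [hmx, List.replicate_zero, List.nil_append,
        PySem.List.pyRange_one_cons (by omega : lo + 1 < hi + 1)]
      have := ih (lo + 1) hi (by omega)
      rw [hc1, List.replicate_zero, List.nil_append] at this
      have hmx2 : max (lo + 1) (r + 1) = lo + 1 := by omega
      rw [hmx2] at this
      rw [this]

theorem seg_eq_map (n left right r : Int) (hn : 0 < n) :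
    pvSeg n left right r =
      (PySem.List.pyRange (r * n + max (left - r * n) 0) (r * n + min (right - r * n + 1) n) 1).map (pvCell n) := by
  unfold pvSeg
  rw [seg_shape r ((min (right - r * n + 1) n - max (left - r * n) 0).toNat) _ _ rfl]
  rw [pyRange_shift, List.map_map]
  refine List.map_congr_left (fun c hc => ?_)
  rw [PySem.List.mem_pyRange_one] at hc
  simp only [Function.comp]
  exact (cell_eq n r c hn (by omega) (by omega)).symm

theorem rows_eq (n left right : Int) (hn : 0 < n) (hlr : left ≤ right) :
    ∀ (k : Nat) (ρ : Int), (PySem.Int.floordiv right n + 1 - ρ).toNat = k →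
      PySem.Int.floordiv left n ≤ ρ →
      (PySem.List.pyRange ρ (PySem.Int.floordiv right n + 1) 1).flatMap (pvSeg n left right)
        = (PySem.List.pyRange (max left (ρ * n)) (right + 1) 1).map (pvCell n) := by
  intro k
  induction k with
  | zero =>
    intro ρ hk hρ
    have hR := PySem.Int.floordiv_mul_add_mod right n
    have hmlt : PySem.Int.mod right n < n := PySem.Int.mod_lt _ hn
    have h1 : PySem.Int.floordiv right n + 1 ≤ ρ := by omega
    have h2 : (PySem.Int.floordiv right n + 1) * n ≤ ρ * n :=
      mul_le_mul_of_nonneg_right h1 (le_of_lt hn)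
    have h3 : (PySem.Int.floordiv right n + 1) * n = PySem.Int.floordiv right n * n + n := by ring
    have hempty : right + 1 ≤ max left (ρ * n) := by
      have : right + 1 ≤ ρ * n := by linarith
      omega
    rw [PySem.List.pyRange_one_eq_nil (by omega), PySem.List.pyRange_one_eq_nil hempty]
    simp
  | succ m ih =>
    intro ρ hk hρ
    have hR := PySem.Int.floordiv_mul_add_mod right n
    have hmlt : PySem.Int.mod right n < n := PySem.Int.mod_lt _ hn
    have hm0 : 0 ≤ PySem.Int.mod right n := PySem.Int.mod_nonneg _ hn
    have hL := PySem.Int.floordiv_mul_add_mod left n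
    have hlt2 : PySem.Int.mod left n < n := PySem.Int.mod_lt _ hn
    have hl0 : 0 ≤ PySem.Int.mod left n := PySem.Int.mod_nonneg _ hn
    have hρR : ρ ≤ PySem.Int.floordiv right n := by omega
    have hmono : (PySem.Int.floordiv left n + 1) * n ≤ (ρ + 1) * n :=
      mul_le_mul_of_nonneg_right (by omega) (le_of_lt hn)
    have hmono2 : ρ * n ≤ PySem.Int.floordiv right n * n :=
      mul_le_mul_of_nonneg_right hρR (le_of_lt hn)
    have hexpL : (PySem.Int.floordiv left n + 1) * n = PySem.Int.floordiv left n * n + n := by ring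
    have hexpρ : (ρ + 1) * n = ρ * n + n := by ring
    -- left < (ρ+1)*n
    have hleft_lt : left < (ρ + 1) * n := by linarith
    -- ρ*n ≤ right
    have hρn_le : ρ * n ≤ right := by linarith
    rw [PySem.List.pyRange_one_cons (by omega), List.flatMap_cons]
    rw [ih (ρ + 1) (by omega) (by omega)]
    have hmax1 : max left ((ρ + 1) * n) = (ρ + 1) * n := by omega
    rw [hmax1]
    rw [seg_eq_map n left right ρ hn]
    have ha : ρ * n + max (left - ρ * n) 0 = max left (ρ * n) := by omega
    have hb : ρ * n + min (right - ρ * n + 1) n = min (right + 1) ((ρ + 1) * n) := by omega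
    rw [ha, hb]
    by_cases hcase : (ρ + 1) * n ≤ right + 1
    · have hmin : min (right + 1) ((ρ + 1) * n) = (ρ + 1) * n := by omega
      rw [hmin, ← List.map_append, ← PySem.List.pyRange_one_append _ _ _ (by omega) hcase]
    · have hmin : min (right + 1) ((ρ + 1) * n) = right + 1 := by omega
      rw [hmin, PySem.List.pyRange_one_eq_nil (by omega : right + 1 ≤ (ρ + 1) * n)]
      simp

theorem if_append (c : Prop) [Decidable c] (out xs : List Int) :
    (if c then out ++ xs else out) = out ++ (if c then xs else []) := by
  split <;> simp

theorem if_append2 (c : Prop) [Decidable c] (out xs ys : List Int) :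
    (if c then out ++ (xs ++ ys) else out ++ xs) = out ++ (xs ++ if c then ys else []) := by
  split <;> simp

theorem alt_body (n left right : Int) (hn : 0 < n) (hlr : left ≤ right) :
    solution_alt n left right
      = (PySem.List.pyRange (PySem.Int.floordiv left n) (PySem.Int.floordiv right n + 1) 1).flatMap
          (pvSeg n left right) := by
  have hc : ¬ right < left := by omega
  simp only [solution_alt, if_neg hc]
  simp only [if_append, List.append_assoc, if_append2]
  rw [PySem.List.foldl_append_eq_flatMap, List.nil_append]
  rw [List.flatMap_def, List.flatMap_def]
  refine congrArg List.flatten (List.map_congr_left (fun r hr => ?_))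
  rw [PySem.List.mem_pyRange_one] at hr
  have hL := PySem.Int.floordiv_mul_add_mod left n
  have hl0 : 0 ≤ PySem.Int.mod left n := PySem.Int.mod_nonneg _ hn
  have hl1 : PySem.Int.mod left n < n := PySem.Int.mod_lt _ hn
  have hR := PySem.Int.floordiv_mul_add_mod right n
  have hr0 : 0 ≤ PySem.Int.mod right n := PySem.Int.mod_nonneg _ hn
  have hr1 : PySem.Int.mod right n < n := PySem.Int.mod_lt _ hn
  simp only [beq_iff_eq, gt_iff_lt]
  have hlo : (if r = PySem.Int.floordiv left n then left - r * n else 0) = max (left - r * n) 0 := by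
    by_cases h : r = PySem.Int.floordiv left n
    · rw [if_pos h, h]; omega
    · rw [if_neg h]
      have h2 : (PySem.Int.floordiv left n + 1) * n ≤ r * n :=
        mul_le_mul_of_nonneg_right (by omega) (le_of_lt hn)
      have h3 : (PySem.Int.floordiv left n + 1) * n = PySem.Int.floordiv left n * n + n := by ring
      have : left < r * n := by linarith
      omega
  have hhi : (if r = PySem.Int.floordiv right n then right - r * n + 1 else n) = min (right - r * n + 1) n := by
    by_cases h : r = PySem.Int.floordiv right n
    · rw [if_pos h, h]; omega
    · rw [if_neg h]
      have hr2 : r + 1 ≤ PySem.Int.floordiv right n := by omega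
      have h2 : (r + 1) * n ≤ PySem.Int.floordiv right n * n :=
        mul_le_mul_of_nonneg_right hr2 (le_of_lt hn)
      have h3 : (r + 1) * n = r * n + n := by ring
      have : r * n + n ≤ right := by linarith
      omega
  rw [hlo, hhi]
  unfold pvSeg
  set lo := max (left - r * n) 0 with hlodef
  set hi := min (right - r * n + 1) n with hhidef
  by_cases h1 : lo < min hi (r + 1)
  · by_cases h2 : max lo (r + 1) < hi
    · rw [if_pos h1, if_pos h2]
    · rw [if_pos h1, if_neg h2, PySem.List.pyRange_one_eq_nil (by omega)]
  · have hz : (min hi (r + 1) - lo).toNat = 0 := by omega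
    by_cases h2 : max lo (r + 1) < hi
    · rw [if_neg h1, hz, List.replicate_zero, if_pos h2]
    · rw [if_neg h1, hz, List.replicate_zero, if_neg h2, PySem.List.pyRange_one_eq_nil (by omega)]

-- ===== VERDICT (by name: the statement is the Claim_ definition above) =====
theorem solution_spec : Claim_equal_solution := by
  intro n left right _ hpre
  unfold Spec_solution
  by_cases hlr : right < left
  · unfold solution solution_alt
    rw [if_pos hlr, PySem.List.pyRange_one_eq_nil (by omega)]
    rfl
  · have hn : 0 < n := by rcases hpre with h | h <;> omega
    rw [solution_eq_map, alt_body n left right hn (by omega),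
      rows_eq n left right hn (by omega) _ (PySem.Int.floordiv left n) rfl le_rfl]
    have hL := PySem.Int.floordiv_mul_add_mod left n
    have hl0 : 0 ≤ PySem.Int.mod left n := PySem.Int.mod_nonneg _ hn
    have hmax : max left (PySem.Int.floordiv left n * n) = left := by omega
    rw [hmax]
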